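-- pv_equiv track=rewrite | github.com/priyanka-2120/AI-Powered-Resume-Optimization-System | app.py | split_markdown_bold_segments
-- ===== SOURCE A (Python) =====
-- def split_markdown_bold_segments(text: str) -> list[tuple[str, bool]]:
--     segments: list[tuple[str, bool]] = []
--     parts = text.split("**")
--     for idx, part in enumerate(parts):
--         if not part:
--             continue
--         segments.append((part, idx % 2 == 1))
--     if not segments:
--         return [("", False)]
--     return segments
-- ===== SOURCE B (Python) =====
-- def split_markdown_bold_segments(text: str) -> list[tuple[str, bool]]:
--     segments: list[tuple[str, bool]] = []
--     run = ""
--     bold = False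
--     i = 0
--     n = len(text)
--     while i < n:
--         if text.startswith("**", i):
--             if run:
--                 segments.append((run, bold))
--             run = ""
--             bold = not bold
--             i += 2
--         else:
--             run += text[i]
--             i += 1
--     if run:
--         segments.append((run, bold))
--     if not segments:
--         return [("", False)]
--     return segments
-- ===== Notes on version B (the rewrite author's own statement) =====
-- stated objective: alternative
-- what changed: B replaces str.split('**') followed by an enumerate-parity filtering pass with a single left-to-right index scanner that accumulates the current run and toggles a bold flag at each '**' marker.
import Mathlib
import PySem

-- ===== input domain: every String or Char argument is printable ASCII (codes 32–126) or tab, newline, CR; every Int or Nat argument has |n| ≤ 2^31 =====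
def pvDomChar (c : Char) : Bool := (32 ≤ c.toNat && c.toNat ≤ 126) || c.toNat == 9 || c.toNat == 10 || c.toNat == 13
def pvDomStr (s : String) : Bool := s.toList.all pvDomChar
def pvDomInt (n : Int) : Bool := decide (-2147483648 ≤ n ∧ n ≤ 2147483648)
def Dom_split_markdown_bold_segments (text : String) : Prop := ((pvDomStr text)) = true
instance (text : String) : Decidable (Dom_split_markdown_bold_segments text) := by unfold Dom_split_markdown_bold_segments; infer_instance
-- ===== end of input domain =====

-- B scans the string once with an index, a run accumulator and a toggling bold flag,
-- instead of A's split("**") plus enumerate-parity pass; same cost, different decomposition.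

-- ===== PORT A =====
def split_markdown_bold_segments (text : String) : List (String × Bool) :=
  let parts := PySem.Chars.splitOn text.toList ['*', '*']
  let segments :=
    (parts.foldl
      (fun (st : List (String × Bool) × Nat) part =>
        (if part = [] then st.1 else st.1 ++ [(String.ofList part, st.2 % 2 == 1)], st.2 + 1))
      ([], 0)).1
  if segments = [] then [("", false)] else segments

-- ===== PORT B =====
-- the while loop of Source B: run/bold/segments are the loop state, two chars of lookahead
def altGo : List Char → String → Bool → List (String × Bool) → List (String × Bool)
  | c :: c2 :: rest, run, bold, segs =>
      if c = '*' ∧ c2 = '*' then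
        altGo rest "" (!bold) (if run = "" then segs else segs ++ [(run, bold)])
      else
        altGo (c2 :: rest) (run.push c) bold segs
  | [c], run, bold, segs => altGo [] (run.push c) bold segs
  | [], run, bold, segs => if run = "" then segs else segs ++ [(run, bold)]

def split_markdown_bold_segments_alt (text : String) : List (String × Bool) :=
  let segs := altGo text.toList "" false []
  if segs = [] then [("", false)] else segs

-- ===== PRECONDITION & SPEC =====
def Spec_split_markdown_bold_segments (text : String) (out : List (String × Bool)) : Prop := out = split_markdown_bold_segments_alt text
instance (text : String) (out : List (String × Bool)) : Decidable (Spec_split_markdown_bold_segments text out) := by unfold Spec_split_markdown_bold_segments; infer_instance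

-- ===== CLAIM (what is proved, stated in full; the proofs are below) =====
def Claim_equal_split_markdown_bold_segments : Prop := ∀ (text : String), Dom_split_markdown_bold_segments text → Spec_split_markdown_bold_segments text (split_markdown_bold_segments text)

-- ===== LEMMAS AND PROOFS =====

-- reference splitter: split on "**", kept as a plain structural recursion
def splitAux : List Char → List (List Char)
  | [] => [[]]
  | [c] => [[c]]
  | c :: c2 :: rest =>
    if c = '*' ∧ c2 = '*' then [] :: splitAux rest
    else
      match splitAux (c2 :: rest) with
      | p :: ps => (c :: p) :: ps
      | [] => [[c]]

def mapFirst (f : List Char → List Char) : List (List Char) → List (List Char)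
  | [] => []
  | p :: ps => f p :: ps

-- alternating-flag rendering of the parts list
def boldRuns : Bool → List (List Char) → List (String × Bool)
  | _, [] => []
  | bold, p :: ps => (if p = [] then [] else [(String.ofList p, bold)]) ++ boldRuns (!bold) ps

theorem splitAux_ne_nil (l : List Char) : splitAux l ≠ [] := by
  match l with
  | [] => simp [splitAux]
  | [c] => simp [splitAux]
  | c :: c2 :: rest =>
    rw [splitAux]
    split
    · simp
    · cases h : splitAux (c2 :: rest) <;> simp

theorem go_eq : ∀ (fuel : Nat) (l cur : List Char) (acc : List (List Char)),
    l.length < fuel →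
    PySem.Chars.splitOn.go ['*','*'] fuel l cur acc
      = acc.reverse ++ mapFirst (fun p => cur.reverse ++ p) (splitAux l) := by
  intro fuel
  induction fuel with
  | zero => intro l cur acc h; omega
  | succ f ih =>
    intro l cur acc h
    match l with
    | [] =>
      simp [PySem.Chars.splitOn.go, splitAux, mapFirst]
    | [c] =>
      have hp : List.isPrefixOf ['*','*'] [c] = false := by
        simp [List.isPrefixOf]
      rw [show PySem.Chars.splitOn.go ['*','*'] (f+1) [c] cur acc
            = if List.isPrefixOf ['*','*'] [c] then
                PySem.Chars.splitOn.go ['*','*'] f (List.drop 2 [c]) [] (cur.reverse :: acc)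
              else PySem.Chars.splitOn.go ['*','*'] f [] (c :: cur) acc from rfl]
      rw [hp]
      simp only [Bool.false_eq_true, if_false]
      rw [ih [] (c :: cur) acc (by simp at h ⊢; omega)]
      simp [splitAux, mapFirst]
    | c :: c2 :: rest =>
      rw [show PySem.Chars.splitOn.go ['*','*'] (f+1) (c :: c2 :: rest) cur acc
            = if List.isPrefixOf ['*','*'] (c :: c2 :: rest) then
                PySem.Chars.splitOn.go ['*','*'] f (List.drop 2 (c :: c2 :: rest)) [] (cur.reverse :: acc)
              else PySem.Chars.splitOn.go ['*','*'] f (c2 :: rest) (c :: cur) acc from rfl]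
      by_cases hs : c = '*' ∧ c2 = '*'
      · obtain ⟨h1, h2⟩ := hs
        subst h1; subst h2
        have hp : List.isPrefixOf ['*','*'] ('*' :: '*' :: rest) = true := by
          simp [List.isPrefixOf]
        rw [hp]
        simp only [if_true, List.drop]
        rw [ih rest [] (cur.reverse :: acc) (by simp at h ⊢; omega)]
        rw [show splitAux ('*' :: '*' :: rest) = [] :: splitAux rest from by
          rw [splitAux]; simp]
        simp [mapFirst]
        cases hsp : splitAux rest with
        | nil => exact absurd hsp (splitAux_ne_nil rest)
        | cons p ps => simp
      · have hp : List.isPrefixOf ['*','*'] (c :: c2 :: rest) = false := by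
          by_cases h1 : c = '*'
          · have h2 : ¬ c2 = '*' := fun h2 => hs ⟨h1, h2⟩
            simp [List.isPrefixOf, h1, Ne.symm h2]
          · simp [List.isPrefixOf, beq_iff_eq, Ne.symm h1]
        rw [hp]
        simp only [Bool.false_eq_true, if_false]
        rw [ih (c2 :: rest) (c :: cur) acc (by simp at h ⊢; omega)]
        rw [show splitAux (c :: c2 :: rest)
              = match splitAux (c2 :: rest) with
                | p :: ps => (c :: p) :: ps
                | [] => [[c]] from by rw [splitAux]; simp [hs]]
        cases hsp : splitAux (c2 :: rest) with
        | nil => exact absurd hsp (splitAux_ne_nil (c2 :: rest))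
        | cons p ps => simp [mapFirst]

theorem splitOn_eq (l : List Char) : PySem.Chars.splitOn l ['*','*'] = splitAux l := by
  rw [show PySem.Chars.splitOn l ['*','*']
        = PySem.Chars.splitOn.go ['*','*'] (l.length + 1) l [] [] from rfl]
  rw [go_eq (l.length + 1) l [] [] (by omega)]
  cases hsp : splitAux l with
  | nil => exact absurd hsp (splitAux_ne_nil l)
  | cons p ps => simp [mapFirst]

theorem parity_succ (k : Nat) : ((k + 1) % 2 == 1) = !(k % 2 == 1) := by
  rcases Nat.mod_two_eq_zero_or_one k with h | h <;> simp [Nat.add_mod, h]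

theorem foldA : ∀ (parts : List (List Char)) (segs : List (String × Bool)) (k : Nat),
    (parts.foldl
      (fun (st : List (String × Bool) × Nat) part =>
        (if part = [] then st.1 else st.1 ++ [(String.ofList part, st.2 % 2 == 1)], st.2 + 1))
      (segs, k)).1 = segs ++ boldRuns (k % 2 == 1) parts := by
  intro parts
  induction parts with
  | nil => intro segs k; simp [boldRuns]
  | cons p ps ih =>
    intro segs k
    simp only [List.foldl_cons]
    rw [ih]
    rw [boldRuns]
    rw [parity_succ]
    by_cases hp : p = [] <;> simp [hp]

theorem altGo_eq : ∀ (l : List Char) (run : String) (bold : Bool) (segs : List (String × Bool)),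
    altGo l run bold segs
      = segs ++ boldRuns bold (mapFirst (fun p => run.toList ++ p) (splitAux l)) := by
  intro l
  induction l using splitAux.induct with
  | case1 =>
    intro run bold segs
    rw [altGo, splitAux]
    by_cases h : run = ""
    · simp [h, mapFirst, boldRuns]
    · simp [mapFirst, boldRuns, h, String.toList_eq_nil_iff, String.ofList_toList]
  | case2 c =>
    intro run bold segs
    rw [altGo, altGo, splitAux]
    simp [mapFirst, boldRuns, String.push_ne_empty, ← String.toList_push, String.ofList_toList]
  | case3 c c2 rest hs ih =>
    intro run bold segs
    obtain ⟨h1, h2⟩ := hs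
    subst h1; subst h2
    rw [altGo, if_pos ⟨rfl, rfl⟩, ih]
    rw [show splitAux ('*' :: '*' :: rest) = [] :: splitAux rest from by
      rw [splitAux]; simp]
    cases hsp : splitAux rest with
    | nil => exact absurd hsp (splitAux_ne_nil rest)
    | cons p ps =>
      by_cases h : run = "" <;>
        simp [h, mapFirst, boldRuns, String.toList_eq_nil_iff, String.ofList_toList,
          List.append_assoc]
  | case4 c c2 rest hne p ps heq ih =>
    intro run bold segs
    rw [altGo, if_neg hne, ih]
    rw [show splitAux (c :: c2 :: rest) = (c :: p) :: ps from by
      rw [splitAux]; simp [hne, heq]]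
    rw [heq]
    simp [mapFirst, boldRuns, String.toList_push]
  | case5 c c2 rest hne hnil ih => exact absurd hnil (splitAux_ne_nil _)

-- ===== VERDICT (by name: the statement is the Claim_ definition above) =====
theorem split_markdown_bold_segments_spec : Claim_equal_split_markdown_bold_segments := by
  intro text _
  unfold Spec_split_markdown_bold_segments
  unfold split_markdown_bold_segments split_markdown_bold_segments_alt
  simp only [splitOn_eq, foldA, altGo_eq, List.nil_append]
  have h0 : ((0 : Nat) % 2 == 1) = false := by decide
  rw [h0]
  cases hsp : splitAux text.toList with
  | nil => exact absurd hsp (splitAux_ne_nil text.toList)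
  | cons p ps => simp [mapFirst]
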